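-- pv_equiv track=rewrite | github.com/harayoki/msx_pyutils | projects/mmsxxasmhelper/src/mmsxxasmhelper/msxutils.py | _best_palette_pair
-- ===== SOURCE A (Python) =====
-- def _best_palette_pair(
--     block_pixels: list[tuple[int, int, int]],
--     palette: list[tuple[int, int, int]],
-- ) -> tuple[int, int]:
--     best_pair = (0, 0)
--     best_error = float("inf")
--     for i in range(len(palette)):
--         ri, gi, bi = palette[i]
--         for j in range(i, len(palette)):
--             rj, gj, bj = palette[j]
--             error = 0
--             for r, g, b in block_pixels:
--                 da = (r - ri) ** 2 + (g - gi) ** 2 + (b - bi) ** 2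
--                 db = (r - rj) ** 2 + (g - gj) ** 2 + (b - bj) ** 2
--                 error += da if da <= db else db
--                 if error >= best_error:
--                     break
--             if error < best_error:
--                 best_error = error
--                 best_pair = (i, j)
--     return best_pair
-- ===== SOURCE B (Python) =====
-- def _best_palette_pair(
--     block_pixels: list[tuple[int, int, int]],
--     palette: list[tuple[int, int, int]],
-- ) -> tuple[int, int]:
--     n = len(palette)
--     pairs = [(i, j) for i in range(n) for j in range(i, n)]
--     # pixel-major streaming: one pass over pixels, updating the error of every pair at once
--     errs = [0] * len(pairs)
--     for (r, g, b) in block_pixels: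
--         d = [(r - cr) ** 2 + (g - cg) ** 2 + (b - cb) ** 2 for (cr, cg, cb) in palette]
--         errs = [e + min(d[i], d[j]) for e, (i, j) in zip(errs, pairs)]
--     best_pair, best = (0, 0), None
--     for e, pair in zip(errs, pairs):
--         if best is None or e < best:
--             best, best_pair = e, pair
--     return best_pair
-- ===== Notes on version B (the rewrite author's own statement) =====
-- stated objective: alternative
-- what changed: Transposes the traversal: instead of A's pair-major triple loop (for each color pair, sum per-pixel min errors with an early break), B makes a single streaming pass over pixels, updating a running error vector for all i<=j pairs simultaneously, then selects the argmin pair in one strict-< scan (same lexicographic tie-breaking).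
import Mathlib
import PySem

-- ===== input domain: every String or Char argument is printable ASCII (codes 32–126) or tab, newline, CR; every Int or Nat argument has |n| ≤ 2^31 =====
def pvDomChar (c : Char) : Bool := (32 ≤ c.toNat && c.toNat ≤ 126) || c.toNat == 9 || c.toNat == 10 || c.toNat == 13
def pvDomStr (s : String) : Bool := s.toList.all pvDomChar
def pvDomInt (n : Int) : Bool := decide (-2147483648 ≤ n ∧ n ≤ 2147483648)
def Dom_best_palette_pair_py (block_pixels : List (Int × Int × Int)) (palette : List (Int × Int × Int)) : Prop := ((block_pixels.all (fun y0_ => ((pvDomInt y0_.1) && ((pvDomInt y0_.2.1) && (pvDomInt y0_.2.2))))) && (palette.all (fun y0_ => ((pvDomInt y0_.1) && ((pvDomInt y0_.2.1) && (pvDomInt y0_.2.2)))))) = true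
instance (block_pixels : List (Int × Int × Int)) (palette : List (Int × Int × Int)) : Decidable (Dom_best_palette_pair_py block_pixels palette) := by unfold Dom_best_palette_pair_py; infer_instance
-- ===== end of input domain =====

-- B transposes A's pair-major triple loop (with early break) into a single pixel-major
-- streaming pass that updates a running error vector over all pairs, then one argmin scan
-- (objective: alternative; same asymptotic cost, no speed claim).


-- ===== PORT A =====
-- best_error = float("inf") is modelled as `none` (no finite best yet); once assigned it is `some v`.
-- `error < best_error` :
def pvLtO (e : Int) : Option Int → Bool
  | none => true
  | some v => e < v

-- `error >= best_error` (the early-break test):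
def pvGeO (e : Int) : Option Int → Bool
  | none => false
  | some v => v ≤ e

-- A's inner pixel loop: accumulate the error, breaking as soon as it reaches best_error.
def pvPairErrA (bestErr : Option Int) (ci cj : Int × Int × Int) :
    List (Int × Int × Int) → Int → Int
  | [], e => e
  | (r, g, b) :: rest, e =>
    let da := (r - ci.1) ^ 2 + (g - ci.2.1) ^ 2 + (b - ci.2.2) ^ 2
    let db := (r - cj.1) ^ 2 + (g - cj.2.1) ^ 2 + (b - cj.2.2) ^ 2
    let e' := e + (if da ≤ db then da else db)
    if pvGeO e' bestErr then e' else pvPairErrA bestErr ci cj rest e'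

-- palette[i] is always indexed in range (i < len(palette)), so getD's default is never used.
def best_palette_pair_py (block_pixels : List (Int × Int × Int)) (palette : List (Int × Int × Int)) : Int × Int :=
  let n := palette.length
  let st := (List.range n).foldl (fun st i =>
    let ci := palette.getD i (0, 0, 0)
    (List.range' i (n - i)).foldl (fun st j =>
      let cj := palette.getD j (0, 0, 0)
      let e := pvPairErrA st.2 ci cj block_pixels 0
      if pvLtO e st.2 then ((i, j), some e) else st) st)
    (((0, 0) : Nat × Nat), (none : Option Int))
  ((st.1.1 : Int), (st.1.2 : Int))

-- ===== PORT B =====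
def pvDist (p c : Int × Int × Int) : Int :=
  (p.1 - c.1) ^ 2 + (p.2.1 - c.2.1) ^ 2 + (p.2.2 - c.2.2) ^ 2

-- d[i] is always indexed in range (i < len(d) = len(palette)), so getD's default is never used.
def best_palette_pair_py_alt (block_pixels : List (Int × Int × Int)) (palette : List (Int × Int × Int)) : Int × Int :=
  let n := palette.length
  let pairs := (List.range n).flatMap (fun i => (List.range' i (n - i)).map (fun j => (i, j)))
  let errs := block_pixels.foldl (fun errs p =>
      let d := palette.map (fun c => pvDist p c)
      (errs.zip pairs).map (fun eq => eq.1 + min (d.getD eq.2.1 0) (d.getD eq.2.2 0)))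
    (List.replicate pairs.length (0 : Int))
  let st := (errs.zip pairs).foldl (fun st c =>
      match st.2 with
      | none => (c.2, some c.1)
      | some v => if c.1 < v then (c.2, some c.1) else st)
    (((0, 0) : Nat × Nat), (none : Option Int))
  ((st.1.1 : Int), (st.1.2 : Int))

-- ===== PRECONDITION & SPEC =====
def Spec_best_palette_pair_py (block_pixels : List (Int × Int × Int)) (palette : List (Int × Int × Int)) (out : Int × Int) : Prop := out = best_palette_pair_py_alt block_pixels palette
instance (block_pixels : List (Int × Int × Int)) (palette : List (Int × Int × Int)) (out : Int × Int) : Decidable (Spec_best_palette_pair_py block_pixels palette out) := by unfold Spec_best_palette_pair_py; infer_instance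

-- ===== CLAIM (what is proved, stated in full; the proofs are below) =====
def Claim_equal_best_palette_pair_py : Prop := ∀ (block_pixels : List (Int × Int × Int)) (palette : List (Int × Int × Int)), Dom_best_palette_pair_py block_pixels palette → Spec_best_palette_pair_py block_pixels palette (best_palette_pair_py block_pixels palette)

-- ===== LEMMAS AND PROOFS =====

-- exact per-pixel, per-pair error term
def pvTerm (ci cj p : Int × Int × Int) : Int := min (pvDist p ci) (pvDist p cj)

-- B's per-pixel increment for pair q, via lookups in the per-pixel distance row
def pvG (pal : List (Int × Int × Int)) (p : Int × Int × Int) (q : Nat × Nat) : Int :=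
  min ((pal.map (fun c => pvDist p c)).getD q.1 0) ((pal.map (fun c => pvDist p c)).getD q.2 0)

theorem pvTerm_nonneg (ci cj p : Int × Int × Int) : 0 ≤ pvTerm ci cj p := by
  unfold pvTerm pvDist
  have h1 : (0:Int) ≤ (p.1 - ci.1) ^ 2 + (p.2.1 - ci.2.1) ^ 2 + (p.2.2 - ci.2.2) ^ 2 := by positivity
  have h2 : (0:Int) ≤ (p.1 - cj.1) ^ 2 + (p.2.1 - cj.2.1) ^ 2 + (p.2.2 - cj.2.2) ^ 2 := by positivity
  exact le_min h1 h2

theorem pvSum_nonneg (ci cj : Int × Int × Int) (pix : List (Int × Int × Int)) :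
    0 ≤ (pix.map (pvTerm ci cj)).sum := by
  apply List.sum_nonneg
  intro x hx
  obtain ⟨p, _, rfl⟩ := List.mem_map.mp hx
  exact pvTerm_nonneg ci cj p

-- A's inner loop with no finite best yet: plain accumulation, no break
theorem pvPairErrA_none (ci cj : Int × Int × Int) (pix : List (Int × Int × Int)) :
    ∀ e : Int, pvPairErrA none ci cj pix e = e + (pix.map (pvTerm ci cj)).sum := by
  induction pix with
  | nil => intro e; simp [pvPairErrA]
  | cons p rest ih =>
    intro e
    obtain ⟨r, g, b⟩ := p
    simp only [pvPairErrA, pvGeO, List.map_cons, List.sum_cons, Bool.false_eq_true, if_false, ih]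
    unfold pvTerm pvDist
    simp only [min_def]
    ring_nf

-- A's inner loop with a finite best v: it breaks only when the full sum would fail `< v` too,
-- and when the full sum passes, it computes exactly that sum.
theorem pvPairErrA_some (ci cj : Int × Int × Int) (pix : List (Int × Int × Int)) :
    ∀ e v : Int,
      ((pvPairErrA (some v) ci cj pix e < v) ↔ (e + (pix.map (pvTerm ci cj)).sum < v)) ∧
      (e + (pix.map (pvTerm ci cj)).sum < v →
        pvPairErrA (some v) ci cj pix e = e + (pix.map (pvTerm ci cj)).sum) := by
  induction pix with
  | nil => intro e v; simp [pvPairErrA]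
  | cons p rest ih =>
    intro e v
    obtain ⟨r, g, b⟩ := p
    have hterm : (if (r - ci.1) ^ 2 + (g - ci.2.1) ^ 2 + (b - ci.2.2) ^ 2 ≤
        (r - cj.1) ^ 2 + (g - cj.2.1) ^ 2 + (b - cj.2.2) ^ 2 then
        (r - ci.1) ^ 2 + (g - ci.2.1) ^ 2 + (b - ci.2.2) ^ 2 else
        (r - cj.1) ^ 2 + (g - cj.2.1) ^ 2 + (b - cj.2.2) ^ 2) = pvTerm ci cj (r, g, b) := by
      unfold pvTerm pvDist; simp [min_def]
    simp only [pvPairErrA, pvGeO, List.map_cons, List.sum_cons, hterm]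
    set m := pvTerm ci cj (r, g, b) with hm
    have hrest := pvSum_nonneg ci cj rest
    by_cases hbr : v ≤ e + m
    · have hcond : decide (v ≤ e + m) = true := decide_eq_true hbr
      simp only [hcond, if_true]
      exact ⟨⟨fun h => absurd h (by omega), fun h => absurd h (by omega)⟩,
             fun h => absurd h (by omega)⟩
    · have hcond : decide (v ≤ e + m) = false := decide_eq_false hbr
      simp only [hcond, Bool.false_eq_true, if_false]
      have hih := ih (e + m) v
      constructor
      · rw [hih.1]; constructor <;> (intro h; omega)
      · intro h
        rw [hih.2 (by omega)]; ring

-- zipping a mapped list with its source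
theorem pvZip_map_self {α β : Type} (f : α → β) (l : List α) :
    (l.map f).zip l = l.map (fun x => (f x, x)) := by
  induction l with
  | nil => rfl
  | cons x rest ih => simpa [List.zip_cons_cons] using ih

-- [0] * len(pairs) as a map over pairs
theorem pvMap_zero {alpha : Type} (l : List alpha) :
    List.replicate l.length (0 : Int) = l.map (fun _ => (0 : Int)) := by
  induction l with
  | nil => rfl
  | cons x rest ih => rw [List.length_cons, List.replicate_succ, List.map_cons, ih]

-- B's pixel fold keeps errs = pairs.map (base + partial sum) as an invariant
theorem pvAcc_inv (pal : List (Int × Int × Int)) (pairs : List (Nat × Nat))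
    (pix : List (Int × Int × Int)) :
    ∀ f : Nat × Nat → Int,
    pix.foldl (fun errs p =>
        (errs.zip pairs).map (fun eq => eq.1 +
          min ((pal.map (fun c => pvDist p c)).getD eq.2.1 0)
              ((pal.map (fun c => pvDist p c)).getD eq.2.2 0)))
      (pairs.map f)
    = pairs.map (fun q => f q + (pix.map (fun p => pvG pal p q)).sum) := by
  induction pix with
  | nil => intro f; simp
  | cons p rest ih =>
    intro f
    simp only [List.foldl_cons]
    have hstep : ((pairs.map f).zip pairs).map
        (fun eq => eq.1 + min (((pal.map (fun c => pvDist p c)).getD eq.2.1 0))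
                             (((pal.map (fun c => pvDist p c)).getD eq.2.2 0)))
        = pairs.map (fun q => f q + pvG pal p q) := by
      rw [pvZip_map_self, List.map_map]
      rfl
    rw [hstep, ih (fun q => f q + pvG pal p q)]
    apply List.map_congr_left
    intro q _
    simp [List.sum_cons]
    ring

-- indexing a mapped list in range
theorem pvGetD_map (l : List (Int × Int × Int)) (f : (Int × Int × Int) → Int)
    (i : Nat) (h : i < l.length) (x : Int) :
    (l.map f).getD i x = f (l.getD i (0, 0, 0)) := by
  simp [List.getD_eq_getElem?_getD, List.getElem?_map, List.getElem?_eq_getElem h]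

-- for an in-range pair, B's increment is the exact term
theorem pvG_eq (pal : List (Int × Int × Int)) (p : Int × Int × Int) (i j : Nat)
    (hi : i < pal.length) (hj : j < pal.length) :
    pvG pal p (i, j) = pvTerm (pal.getD i (0,0,0)) (pal.getD j (0,0,0)) p := by
  unfold pvG pvTerm
  rw [pvGetD_map pal (fun c => pvDist p c) i hi, pvGetD_map pal (fun c => pvDist p c) j hj]

-- the two outer pair loops compute the same final state
theorem pvOuter_eq (pix pal : List (Int × Int × Int)) :
    List.foldl
      (fun st i =>
        List.foldl
          (fun st j =>
            if pvLtO (pvPairErrA st.2 (pal.getD i (0,0,0)) (pal.getD j (0,0,0)) pix 0) st.2 = true then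
              ((i, j), some (pvPairErrA st.2 (pal.getD i (0,0,0)) (pal.getD j (0,0,0)) pix 0))
            else st)
          st (List.range' i (pal.length - i)))
      (((0,0) : Nat × Nat), (none : Option Int)) (List.range pal.length)
  = List.foldl
      (fun acc x =>
        List.foldl
          (fun st c =>
            match st.2 with
            | none => (c.2, some c.1)
            | some v => if c.1 < v then (c.2, some c.1) else st)
          acc
          (List.map (fun j => (0 + (pix.map (fun p => pvG pal p (x, j))).sum, (x, j)))
            (List.range' x (pal.length - x))))
      (((0,0) : Nat × Nat), (none : Option Int)) (List.range pal.length) := by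
  apply PySem.List.foldl_congr_mem
  intro acc i hi
  rw [List.foldl_map]
  apply PySem.List.foldl_congr_mem
  intro st j hj
  have hi' : i < pal.length := List.mem_range.mp hi
  have hj' : j < pal.length := by
    have := List.mem_range'_1.mp hj
    omega
  simp only [zero_add]
  have hG : (pix.map (fun p => pvG pal p (i, j))).sum
      = (pix.map (pvTerm (pal.getD i (0,0,0)) (pal.getD j (0,0,0)))).sum := by
    congr 1
    apply List.map_congr_left
    intro p _
    exact pvG_eq pal p i j hi' hj'
  rw [hG]
  set ci := pal.getD i (0,0,0)
  set cj := pal.getD j (0,0,0)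
  set S := (pix.map (pvTerm ci cj)).sum with hS
  obtain ⟨pr, be⟩ := st
  cases be with
  | none =>
    rw [pvPairErrA_none ci cj pix 0]
    simp [pvLtO]
    exact hS.symm
  | some v =>
    have h := pvPairErrA_some ci cj pix 0 v
    simp only [zero_add, ← hS] at h
    by_cases hlt : S < v
    · rw [h.2 hlt]
      simp [pvLtO, hlt]
    · have hne : ¬ (pvPairErrA (some v) ci cj pix 0 < v) := by
        rw [h.1]; omega
      simp [pvLtO, hlt, hne]

-- ===== VERDICT (by name: the statement is the Claim_ definition above) =====
theorem best_palette_pair_py_spec : Claim_equal_best_palette_pair_py := by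
  intro pix pal _
  unfold Spec_best_palette_pair_py
  simp only [best_palette_pair_py, best_palette_pair_py_alt]
  rw [pvMap_zero, pvAcc_inv, pvZip_map_self, List.map_flatMap, List.foldl_flatMap, pvOuter_eq]
  simp only [List.map_map]
  rfl
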